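-- pv_equiv track=rewrite | github.com/dhruvraj-singh-rawat/Coding-Practice | Cracking the Coding Interview/8. Recursion and Dynamic Programming/8.5 Recursive Multiply.py | bitMultiply
-- ===== SOURCE A (Python) =====
-- def bitMultiply(m,n):
--
--     ans = 0
--     count = 0
--
--     while(n>0):
--
--         if(n%2==1):
--
--             ans = ans+(m<<count)
--
--
--         count=count+1
--         n=int(n/2)
--
--     return ans
-- ===== SOURCE B (Python) =====
-- def bitMultiply(m, n):
--     # divide-and-conquer on n instead of iterating over bit positions
--     if n <= 0:
--         return 0
--     half = bitMultiply(m, n // 2)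
--     return half + half + (m if n % 2 == 1 else 0)
-- ===== Notes on version B (the rewrite author's own statement) =====
-- stated objective: alternative
-- what changed: Replaced the iterative shift-counter loop (accumulator ans, count, n halved each step) by a recursive divide-and-conquer on n: half = bitMultiply(m, n//2), result = half + half + (m if n odd else 0); no shift counter is maintained.
import Mathlib
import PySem

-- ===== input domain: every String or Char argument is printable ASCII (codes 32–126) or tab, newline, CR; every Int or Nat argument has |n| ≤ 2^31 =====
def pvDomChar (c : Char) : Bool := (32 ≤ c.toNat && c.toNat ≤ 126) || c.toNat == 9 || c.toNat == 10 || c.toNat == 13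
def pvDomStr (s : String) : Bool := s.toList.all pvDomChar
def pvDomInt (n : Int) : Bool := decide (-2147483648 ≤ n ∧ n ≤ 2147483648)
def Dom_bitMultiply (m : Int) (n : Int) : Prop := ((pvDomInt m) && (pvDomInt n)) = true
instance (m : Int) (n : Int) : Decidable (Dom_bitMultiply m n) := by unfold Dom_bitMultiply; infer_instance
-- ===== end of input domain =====

-- B replaces A's iterative shift-and-add bit loop by divide-and-conquer recursion on n (objective: alternative decomposition, same cost).

-- ===== PORT A =====
-- the while loop, carried state (ans, count, n); n=int(n/2) has n>0 and |n| ≤ 2^31 here,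
-- where truncating float division coincides with Int ediv `n / 2` (exact).
def bitMultiplyLoop (m : Int) (ans : Int) (count : Nat) (n : Int) : Int :=
  if h : n > 0 then
    bitMultiplyLoop m (if n % 2 = 1 then ans + m * 2 ^ count else ans) (count + 1) (n / 2)
  else ans
termination_by n.toNat
decreasing_by
  omega

def bitMultiply (m : Int) (n : Int) : Int := bitMultiplyLoop m 0 0 n

-- ===== PORT B =====
def bitMultiply_alt (m : Int) (n : Int) : Int :=
  if _h : n ≤ 0 then 0
  else
    let half := bitMultiply_alt m (n / 2)
    half + half + (if n % 2 = 1 then m else 0)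
termination_by n.toNat
decreasing_by
  omega

-- ===== PRECONDITION & SPEC =====
def Spec_bitMultiply (m : Int) (n : Int) (out : Int) : Prop := out = bitMultiply_alt m n
instance (m : Int) (n : Int) (out : Int) : Decidable (Spec_bitMultiply m n out) := by unfold Spec_bitMultiply; infer_instance

-- ===== CLAIM (what is proved, stated in full; the proofs are below) =====
def Claim_equal_bitMultiply : Prop := ∀ (m : Int) (n : Int), Dom_bitMultiply m n → Spec_bitMultiply m n (bitMultiply m n)

-- ===== LEMMAS AND PROOFS =====

-- A's loop computes ans + m·2^count·n for nonnegative n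
theorem bitMultiplyLoop_eq (m : Int) : ∀ (k : Nat) (n : Int), n.toNat = k → 0 ≤ n →
    ∀ (ans : Int) (count : Nat), bitMultiplyLoop m ans count n = ans + m * 2 ^ count * n := by
  intro k
  induction k using Nat.strong_induction_on with
  | _ k ih =>
    intro n hk hn ans count
    rw [bitMultiplyLoop]
    by_cases h : n > 0
    · simp only [h, dif_pos]
      rw [ih (n / 2).toNat (by omega) _ rfl (by omega)]
      have hdm : n = 2 * (n / 2) + n % 2 := by omega
      have hm : n % 2 = 0 ∨ n % 2 = 1 := by omega
      rcases hm with hm | hm <;> simp only [hm] <;> norm_num <;>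
        linear_combination (-(m * 2 ^ count)) * hdm + (-(m * 2 ^ count)) * hm
    · have hz : n = 0 := by omega
      simp [hz]

-- B computes m·n for nonnegative n
theorem bitMultiply_alt_eq (m : Int) : ∀ (k : Nat) (n : Int), n.toNat = k → 0 ≤ n →
    bitMultiply_alt m n = m * n := by
  intro k
  induction k using Nat.strong_induction_on with
  | _ k ih =>
    intro n hk hn
    rw [bitMultiply_alt]
    by_cases h : n ≤ 0
    · have hz : n = 0 := by omega
      simp [hz]
    · simp only [h]
      rw [ih (n / 2).toNat (by omega) _ rfl (by omega)]
      have hdm : n = 2 * (n / 2) + n % 2 := by omega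
      have hm : n % 2 = 0 ∨ n % 2 = 1 := by omega
      rcases hm with hm | hm <;> simp only [hm] <;> norm_num <;>
        linear_combination (-m) * hdm + (-m) * hm

-- ===== VERDICT (by name: the statement is the Claim_ definition above) =====
theorem bitMultiply_spec : Claim_equal_bitMultiply := by
  intro m n _
  unfold Spec_bitMultiply bitMultiply
  by_cases h : 0 ≤ n
  · rw [bitMultiplyLoop_eq m n.toNat n rfl h, bitMultiply_alt_eq m n.toNat n rfl h]
    ring
  · rw [bitMultiplyLoop, bitMultiply_alt]
    simp [show ¬ n > 0 by omega, show n ≤ 0 by omega]
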